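-- pv_equiv track=rewrite | github.com/ASSERT-KTH/Mokav | experiments/pynguin/c4b/return-lst/generated_tests/src_1526/1/src_1526.py | func
-- ===== SOURCE A (Python) =====
-- def func(*args):
-- 	ret_values = []
--
--
-- 	def suerte(n):
-- 	    n = str(n)
-- 	    L = [0, 1, 2, 3, 5, 6, 8, 9]
-- 	    for k in L:
-- 	        if (str(k) in n):
-- 	            return False
-- 	    return True
-- 	n = args[0]
-- 	cont = 0
-- 	for k in n:
-- 	    if ((k == '4') or (k == '7')):
-- 	        cont += 1
-- 	if (suerte(cont) and (cont != 0)):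
-- 	    ret_values.append('YES')
-- 	else:
-- 	    ret_values.append('NO')
--
-- 	return ret_values
-- ===== SOURCE B (Python) =====
-- def func(*args):
--     n = args[0]
--     kept = [c for c in n if c in '47']
--     cont = len(kept)
--     m = cont
--     lucky = m > 0
--     while m > 0:
--         if m % 10 not in (4, 7):
--             lucky = False
--             break
--         m //= 10
--     return ['YES' if lucky else 'NO']
-- ===== Notes on version B (the rewrite author's own statement) =====
-- stated objective: alternative
-- what changed: B counts by filtering into a kept list and tests luckiness with an arithmetic while-loop over the count's decimal digits (m % 10, m //= 10), never building str(cont) and never scanning A's forbidden-digit list with substring tests.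
import Mathlib
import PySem

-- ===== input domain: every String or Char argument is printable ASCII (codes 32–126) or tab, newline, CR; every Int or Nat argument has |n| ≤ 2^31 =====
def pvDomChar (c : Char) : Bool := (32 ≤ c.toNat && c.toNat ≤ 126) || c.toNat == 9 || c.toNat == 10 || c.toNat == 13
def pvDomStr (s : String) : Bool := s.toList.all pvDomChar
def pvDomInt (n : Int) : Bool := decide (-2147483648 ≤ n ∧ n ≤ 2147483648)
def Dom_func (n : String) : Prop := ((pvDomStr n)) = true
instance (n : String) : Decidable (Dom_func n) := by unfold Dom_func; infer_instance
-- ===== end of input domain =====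

-- B filters the '4'/'7' characters into a list and takes its length, then tests luckiness by an
-- arithmetic loop over the count's decimal digits (m % 10, m / 10) instead of A's substring tests
-- of str(cont) against a fixed forbidden-digit list; objective: alternative.

-- ===== PORT A =====
-- 'def suerte(n)': the early-return 'for k in L: if str(k) in n: return False / return True' is ported
-- as the negation of an 'any' over the same list, with Python's substring test 'in' = PySem.Chars.isIn.
def suerteA (m : Int) : Bool :=
  !(([0, 1, 2, 3, 5, 6, 8, 9] : List Int).any
      (fun k => PySem.Chars.isIn (PySem.Int.toChars k) (PySem.Int.toChars m)))

def func (n : String) : List String :=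
  let cont : Int :=
    n.toList.foldl (fun cont k => if k == '4' || k == '7' then cont + 1 else cont) 0
  if suerteA cont && cont != 0 then ["YES"] else ["NO"]

-- ===== PORT B =====
-- the 'while m > 0: …' loop of Source B, with its break ported as returning false
def luckyWhile (m : Nat) (lucky : Bool) : Bool :=
  if 0 < m then
    if m % 10 = 4 ∨ m % 10 = 7 then luckyWhile (m / 10) lucky
    else false
  else lucky
decreasing_by exact Nat.div_lt_self (by omega) (by norm_num)

def func_alt (n : String) : List String :=
  let kept := n.toList.filter (fun c => (['4', '7'] : List Char).contains c)
  let cont := kept.length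
  [if luckyWhile cont (decide (0 < cont)) then "YES" else "NO"]

-- ===== PRECONDITION & SPEC =====
def Spec_func (n : String) (out : List String) : Prop := out = func_alt n
instance (n : String) (out : List String) : Decidable (Spec_func n out) := by unfold Spec_func; infer_instance

-- ===== CLAIM (what is proved, stated in full; the proofs are below) =====
def Claim_equal_func : Prop := ∀ (n : String), Dom_func n → Spec_func n (func n)

-- ===== LEMMAS AND PROOFS =====

def pvDigits : List Char := ['0','1','2','3','4','5','6','7','8','9']

theorem mem_toDigitsCore (fuel n : Nat) (ds : List Char) :
    ∀ c ∈ Nat.toDigitsCore 10 fuel n ds, c ∈ ds ∨ c ∈ pvDigits := by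
  induction fuel generalizing n ds with
  | zero => intro c hc; exact Or.inl hc
  | succ f ih =>
    intro c hc
    have hd : (n % 10).digitChar ∈ pvDigits := by
      have h10 : n % 10 < 10 := Nat.mod_lt _ (by norm_num)
      interval_cases h : (n % 10) <;> simp [pvDigits, Nat.digitChar]
    simp only [Nat.toDigitsCore] at hc
    split at hc
    · rcases List.mem_cons.1 hc with h | h
      · exact Or.inr (h ▸ hd)
      · exact Or.inl h
    · rcases ih _ _ _ hc with h | h
      · rcases List.mem_cons.1 h with h' | h'
        · exact Or.inr (h' ▸ hd)
        · exact Or.inl h'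
      · exact Or.inr h

theorem mem_toDigits (m : Nat) : ∀ c ∈ Nat.toDigits 10 m, c ∈ pvDigits := by
  intro c hc
  rcases mem_toDigitsCore _ _ _ c hc with h | h
  · simp at h
  · exact h

theorem toChars_natCast (m : Nat) : PySem.Int.toChars (m : Int) = Nat.toDigits 10 m := by
  simp [PySem.Int.toChars]

theorem isIn_singleton (c : Char) (s : List Char) :
    PySem.Chars.isIn [c] s = s.contains c := by
  rw [Bool.eq_iff_iff, PySem.Chars.isIn_iff_infix, List.singleton_infix_iff,
    List.contains_iff_mem]

theorem suerte_eq_all47 (m : Nat) :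
    suerteA (m : Int) = (PySem.Int.toChars (m : Int)).all (fun d => d == '4' || d == '7') := by
  rw [Bool.eq_iff_iff]
  simp only [suerteA, toChars_natCast, Bool.not_eq_eq_eq_not, Bool.not_true, List.any_eq_false,
    List.mem_cons, List.not_mem_nil, or_false, List.all_eq_true]
  have key : ∀ d : Char, PySem.Chars.isIn [d] (Nat.toDigits 10 m) = true ↔ d ∈ Nat.toDigits 10 m := by
    intro d
    rw [isIn_singleton]
    simp [List.contains_eq_mem]
  constructor
  · intro h c hc
    have h0 := h 0 (by norm_num); have h1 := h 1 (by norm_num)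
    have h2 := h 2 (by norm_num); have h3 := h 3 (by norm_num)
    have h5 := h 5 (by norm_num); have h6 := h 6 (by norm_num)
    have h8 := h 8 (by norm_num); have h9 := h 9 (by norm_num)
    simp only [show PySem.Int.toChars 0 = ['0'] from rfl, show PySem.Int.toChars 1 = ['1'] from rfl,
      show PySem.Int.toChars 2 = ['2'] from rfl, show PySem.Int.toChars 3 = ['3'] from rfl,
      show PySem.Int.toChars 5 = ['5'] from rfl, show PySem.Int.toChars 6 = ['6'] from rfl,
      show PySem.Int.toChars 8 = ['8'] from rfl, show PySem.Int.toChars 9 = ['9'] from rfl,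
      key] at h0 h1 h2 h3 h5 h6 h8 h9
    have hd := mem_toDigits m c hc
    simp only [pvDigits, List.mem_cons, List.not_mem_nil, or_false] at hd
    rcases hd with h'|h'|h'|h'|h'|h'|h'|h'|h'|h' <;> subst h' <;>
      first
      | rfl
      | exact absurd hc (by assumption)
  · intro h k hk
    rcases hk with h'|h'|h'|h'|h'|h'|h'|h' <;> subst h' <;>
      simp only [show PySem.Int.toChars 0 = ['0'] from rfl, show PySem.Int.toChars 1 = ['1'] from rfl,
        show PySem.Int.toChars 2 = ['2'] from rfl, show PySem.Int.toChars 3 = ['3'] from rfl,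
        show PySem.Int.toChars 5 = ['5'] from rfl, show PySem.Int.toChars 6 = ['6'] from rfl,
        show PySem.Int.toChars 8 = ['8'] from rfl, show PySem.Int.toChars 9 = ['9'] from rfl,
        key] <;>
      exact fun hmem => absurd (h _ hmem) (by decide)

-- all decimal digits of n seen arithmetically, with the same branch shape as Nat.toDigitsCore
def arithAll (p : Char → Bool) (n : Nat) : Bool :=
  if h : n / 10 = 0 then p (Nat.digitChar (n % 10))
  else p (Nat.digitChar (n % 10)) && arithAll p (n / 10)
decreasing_by
  exact Nat.div_lt_self (Nat.pos_of_ne_zero (fun h0 => h (by simp [h0]))) (by norm_num)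

theorem all_toDigitsCore (p : Char → Bool) (f : Nat) :
    ∀ n ds, n < f → (Nat.toDigitsCore 10 f n ds).all p = (arithAll p n && ds.all p) := by
  induction f with
  | zero => intro n ds h; omega
  | succ f ih =>
    intro n ds h
    rw [show Nat.toDigitsCore 10 (f + 1) n ds
        = if n / 10 = 0 then (n % 10).digitChar :: ds
          else Nat.toDigitsCore 10 f (n / 10) ((n % 10).digitChar :: ds) from rfl]
    rw [arithAll]
    split_ifs with h0
    · simp
    · have hlt : n / 10 < f := by
        have h1 : 0 < n := Nat.pos_of_ne_zero (fun h' => h0 (by simp [h']))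
        have := Nat.div_lt_self h1 (show 1 < 10 by norm_num)
        omega
      rw [ih _ _ hlt]
      simp [Bool.and_comm, Bool.and_left_comm]

theorem all_toDigits (p : Char → Bool) (m : Nat) :
    (Nat.toDigits 10 m).all p = arithAll p m := by
  have := all_toDigitsCore p (m + 1) m [] (by omega)
  simpa [Nat.toDigits] using this

theorem luckyWhile_eq (m : Nat) (hm : 0 < m) :
    luckyWhile m true = arithAll (fun d => d == '4' || d == '7') m := by
  induction m using Nat.strong_induction_on with
  | _ m ih =>
    rw [luckyWhile, arithAll]
    simp only [hm, if_true]
    by_cases h47 : m % 10 = 4 ∨ m % 10 = 7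
    · have hp : ((Nat.digitChar (m % 10) == '4' || Nat.digitChar (m % 10) == '7')) = true := by
        rcases h47 with h | h <;> rw [h] <;> decide
      split_ifs with h0
      · rw [h0]
        simp [luckyWhile, hp]
      · have h1 : 0 < m / 10 := Nat.pos_of_ne_zero h0
        rw [hp, Bool.true_and, ih (m / 10) (Nat.div_lt_self hm (by norm_num)) h1]
    · have hp : ((Nat.digitChar (m % 10) == '4' || Nat.digitChar (m % 10) == '7')) = false := by
        have h10 : m % 10 < 10 := Nat.mod_lt _ (by norm_num)
        interval_cases h : (m % 10) <;> simp_all <;> decide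
      split_ifs <;> simp [hp]

theorem contains_47 (c : Char) :
    (['4', '7'] : List Char).contains c = (c == '4' || c == '7') := by
  simp only [List.contains_cons, List.contains_nil, Bool.or_false]

-- ===== VERDICT (by name: the statement is the Claim_ definition above) =====
theorem func_spec : Claim_equal_func := by
  intro n _
  unfold Spec_func func func_alt
  rw [PySem.List.foldl_if_add_one]
  simp only [zero_add]
  have hcnt : (n.toList.filter (fun c => (['4', '7'] : List Char).contains c)).length
      = n.toList.countP (fun k => k == '4' || k == '7') := by
    rw [List.countP_eq_length_filter]
    exact congrArg List.length (List.filter_congr (fun c _ => contains_47 c))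
  rw [hcnt]
  set m : Nat := n.toList.countP (fun k => k == '4' || k == '7') with hm
  rcases Nat.eq_zero_or_pos m with h0 | h0
  · simp [h0, luckyWhile]
  · have hne : ((m : Int) != 0) = true := by simp; omega
    have hlt : decide (0 < m) = true := by simp [h0]
    rw [hne, hlt, Bool.and_true]
    rw [suerte_eq_all47, toChars_natCast, all_toDigits, luckyWhile_eq m h0]
    split <;> rfl
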